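-- pv_equiv track=rewrite | github.com/gkukrety81/rah | backend/app/ai.py | _recommendations_from_text
-- ===== SOURCE A (Python) =====
-- from typing import List, Dict, Any
--
-- def _bullets(items: List[str]) -> List[str]:
--     return [str(s).strip() for s in (items or []) if str(s).strip()]
--
-- def _recommendations_from_text(blob: str) -> Dict[str, List[str]]:
--     """
--     Split the DB 'recommendations' text into buckets if it already contains
--     headings/bullets. Otherwise provide safe defaults.
--     """
--     if not (blob or "").strip():
--         return {
--             "lifestyle": [
--                 "Engage in light-to-moderate activity as tolerated.",
--                 "Prioritize consistent, restorative sleep (7–9 hours).",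
--             ],
--             "nutritional": [
--                 "Favor a whole-food, anti-inflammatory pattern with adequate protein.",
--                 "Maintain good hydration across the day.",
--             ],
--             "emotional": [
--                 "Practice brief daily stress reduction (breathing, meditation, journaling).",
--             ],
--             "bioresonance": [],
--             "follow_up": [
--                 "Reassess progress and tailor steps with practitioner input.",
--             ],
--         }
--
--     buckets = {
--         "lifestyle": [],
--         "nutritional": [],
--         "emotional": [],
--         "bioresonance": [],
--         "follow_up": [],
--     }
--
--     text = blob.replace("\r\n", "\n")
--     headings = [
--         ("diet", "nutritional"),
--         ("nutrition", "nutritional"),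
--         ("lifestyle", "lifestyle"),
--         ("stress", "emotional"),
--         ("emotional", "emotional"),
--         ("rayonex", "bioresonance"),
--         ("follow-up", "follow_up"),
--         ("follow up", "follow_up"),
--     ]
--
--     current = None
--     for raw in text.split("\n"):
--         line = raw.strip()
--         if not line:
--             continue
--
--         low = line.lower()
--         moved = False
--         for needle, key in headings:
--             # treat a line with 'X:' near start as a heading
--             if needle in low and ":" in low[:40]:
--                 current = key
--                 moved = True
--                 break
--         if moved:
--             continue
--
--         if line.startswith(("*", "-", "•")):
--             if current is None:
--                 current = "lifestyle"
--             buckets[current].append(line.lstrip("*•- ").strip())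
--
--     for k in list(buckets.keys()):
--         buckets[k] = _bullets(buckets[k])
--
--     if not any(buckets.values()):
--         return _recommendations_from_text("")
--     return buckets
-- ===== SOURCE B (Python) =====
-- from typing import List, Dict
--
-- _HEADINGS = [
--     ("diet", "nutritional"),
--     ("nutrition", "nutritional"),
--     ("lifestyle", "lifestyle"),
--     ("stress", "emotional"),
--     ("emotional", "emotional"),
--     ("rayonex", "bioresonance"),
--     ("follow-up", "follow_up"),
--     ("follow up", "follow_up"),
-- ]
--
-- _KEYS = ("lifestyle", "nutritional", "emotional", "bioresonance", "follow_up")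
--
-- _DEFAULTS = {
--     "lifestyle": [
--         "Engage in light-to-moderate activity as tolerated.",
--         "Prioritize consistent, restorative sleep (7–9 hours).",
--     ],
--     "nutritional": [
--         "Favor a whole-food, anti-inflammatory pattern with adequate protein.",
--         "Maintain good hydration across the day.",
--     ],
--     "emotional": [
--         "Practice brief daily stress reduction (breathing, meditation, journaling).",
--     ],
--     "bioresonance": [],
--     "follow_up": [
--         "Reassess progress and tailor steps with practitioner input.",
--     ],
-- }
--
--
-- def _classify(raw: str):
--     """Tag one raw line: (True, bucket_key) for a heading, (False, text) for a
--     non-empty bullet, None for anything else."""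
--     line = raw.strip()
--     if not line:
--         return None
--     low = line.lower()
--     if ":" in low[:40]:
--         for needle, key in _HEADINGS:
--             if needle in low:
--                 return (True, key)
--     if line[0] in "*-•":
--         text = line.lstrip("*•- ").strip()
--         if text:
--             return (False, text)
--     return None
--
--
-- def _recommendations_from_text(blob: str) -> Dict[str, List[str]]:
--     if not (blob or "").strip():
--         return {k: list(v) for k, v in _DEFAULTS.items()}
--
--     lines = blob.replace("\r\n", "\n").split("\n")
--     tokens = [t for t in map(_classify, lines) if t is not None]
--
--     # Assign each bullet the key of the last heading before it ('lifestyle' first).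
--     assigned = []
--     cur = "lifestyle"
--     for is_head, val in tokens:
--         if is_head:
--             cur = val
--         else:
--             assigned.append((cur, val))
--
--     buckets = {k: [t for c, t in assigned if c == k] for k in _KEYS}
--     if not any(buckets.values()):
--         return {k: list(v) for k, v in _DEFAULTS.items()}
--     return buckets
-- ===== Notes on version B (the rewrite author's own statement) =====
-- stated objective: alternative
-- what changed: A's single stateful line loop (mutable current pointer appending into a dict of buckets, followed by a _bullets cleanup pass over every bucket) is re-decomposed into three pure stages: classify each line into a tagged token (heading/bullet, dropping empty bullets immediately), fold the token stream to assign each bullet its section key, then build every bucket with one per-key comprehension over the assigned pairs.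
import Mathlib
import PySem

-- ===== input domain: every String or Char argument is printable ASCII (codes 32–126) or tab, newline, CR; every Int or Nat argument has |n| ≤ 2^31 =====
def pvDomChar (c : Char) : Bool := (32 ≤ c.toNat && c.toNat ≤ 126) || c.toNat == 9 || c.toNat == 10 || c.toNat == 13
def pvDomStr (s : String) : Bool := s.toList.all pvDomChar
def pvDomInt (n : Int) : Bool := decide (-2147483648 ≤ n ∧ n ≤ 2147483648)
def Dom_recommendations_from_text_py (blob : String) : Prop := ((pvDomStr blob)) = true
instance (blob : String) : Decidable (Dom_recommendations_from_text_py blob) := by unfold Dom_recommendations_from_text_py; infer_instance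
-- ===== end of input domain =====

-- B re-decomposes A's single stateful line loop into tokenize → assign → per-key comprehensions
-- (objective: alternative decomposition, same cost); equivalence is proved for all inputs.

-- shared module-level constants (the Python module literals)
def pvDefaults : List (String × List String) :=
  [("lifestyle",
     ["Engage in light-to-moderate activity as tolerated.",
      "Prioritize consistent, restorative sleep (7–9 hours)."]),
   ("nutritional",
     ["Favor a whole-food, anti-inflammatory pattern with adequate protein.",
      "Maintain good hydration across the day."]),
   ("emotional",
     ["Practice brief daily stress reduction (breathing, meditation, journaling)."]),
   ("bioresonance", []),
   ("follow_up",
     ["Reassess progress and tailor steps with practitioner input."])]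

def pvHeadings : List (List Char × String) :=
  [("diet".toList, "nutritional"),
   ("nutrition".toList, "nutritional"),
   ("lifestyle".toList, "lifestyle"),
   ("stress".toList, "emotional"),
   ("emotional".toList, "emotional"),
   ("rayonex".toList, "bioresonance"),
   ("follow-up".toList, "follow_up"),
   ("follow up".toList, "follow_up")]

-- ===== PORT A =====
-- line.lstrip("*•- ") is ported by hand as dropWhile over that character set (exact: lstrip
-- with an argument drops the longest leading run of characters from the set).
-- A's main loop: state = (current, buckets); headings are scanned per line with the
-- ':' in low[:40] test inside the per-needle predicate, bullets appended to buckets[current].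
def pvLoopA : List (List Char) → Option String → PySem.Dict String (List String) → PySem.Dict String (List String)
  | [], _, buckets => buckets
  | raw :: rest, current, buckets =>
    let line := PySem.Chars.strip raw
    if line = [] then pvLoopA rest current buckets
    else
      let low := PySem.Chars.lower line
      match pvHeadings.find? (fun nk =>
          PySem.Chars.isIn nk.1 low && PySem.Chars.isIn [':'] (PySem.Chars.slice low none (some 40))) with
      | some nk => pvLoopA rest (some nk.2) buckets
      | none =>
        if PySem.Chars.startswith line ['*'] || PySem.Chars.startswith line ['-'] ||
            PySem.Chars.startswith line ['•'] then
          let cur := current.getD "lifestyle"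
          pvLoopA rest (some cur)
            (buckets.modify cur []
              (· ++ [String.ofList (PySem.Chars.strip
                (line.dropWhile (fun c => c = '*' || c = '•' || c = '-' || c = ' ')))]))
        else pvLoopA rest current buckets

-- _bullets: [str(s).strip() for s in (items or []) if str(s).strip()]  (str(s) = s on strings)
def pvBulletsA (items : List String) : List String :=
  items.filterMap (fun s =>
    let t := PySem.Chars.strip s.toList
    if t = [] then none else some (String.ofList t))

-- the recursive fallback call _recommendations_from_text("") immediately takes the
-- empty-blob branch, i.e. returns the defaults literal; it is ported as that value.
def recommendations_from_text_py (blob : String) : List (String × List String) :=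
  if PySem.Chars.strip blob.toList = [] then pvDefaults
  else
    let text := PySem.Chars.replace blob.toList ['\r', '\n'] ['\n']
    let buckets0 : PySem.Dict String (List String) :=
      PySem.Dict.ofList [("lifestyle", []), ("nutritional", []), ("emotional", []),
                         ("bioresonance", []), ("follow_up", [])]
    let buckets1 := pvLoopA (PySem.Chars.splitOn text ['\n']) none buckets0
    let buckets2 := buckets1.keys.foldl (fun d k => d.insert k (pvBulletsA (d.getD k []))) buckets1
    if buckets2.values.any (fun v => !v.isEmpty) then buckets2.items else pvDefaults

-- ===== PORT B =====
def pvKeys : List String := ["lifestyle", "nutritional", "emotional", "bioresonance", "follow_up"]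

-- _classify: tag one raw line as heading (true, key), bullet (false, text) or none
def pvClassify (raw : List Char) : Option (Bool × String) :=
  let line := PySem.Chars.strip raw
  match line with
  | [] => none
  | c0 :: _ =>
    let low := PySem.Chars.lower line
    match (if PySem.Chars.isIn [':'] (PySem.Chars.slice low none (some 40)) then
             pvHeadings.find? (fun nk => PySem.Chars.isIn nk.1 low)
           else none) with
    | some nk => some (true, nk.2)
    | none =>
      if c0 = '*' || c0 = '-' || c0 = '•' then
        let text := PySem.Chars.strip
          (line.dropWhile (fun c => c = '*' || c = '•' || c = '-' || c = ' '))
        if text = [] then none else some (false, String.ofList text)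
      else none

-- the assignment loop over the token list
def pvAssignB : List (Bool × String) → String → List (String × String) → List (String × String)
  | [], _, acc => acc
  | t :: rest, cur, acc =>
    if t.1 then pvAssignB rest t.2 acc
    else pvAssignB rest cur (acc ++ [(cur, t.2)])

def recommendations_from_text_py_alt (blob : String) : List (String × List String) :=
  if PySem.Chars.strip blob.toList = [] then pvDefaults
  else
    let lines := PySem.Chars.splitOn (PySem.Chars.replace blob.toList ['\r', '\n'] ['\n']) ['\n']
    let tokens := lines.filterMap pvClassify
    let assigned := pvAssignB tokens "lifestyle" []
    let buckets := pvKeys.map (fun k => (k, (assigned.filter (fun p => p.1 == k)).map (·.2)))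
    if (buckets.map (·.2)).any (fun v => !v.isEmpty) then buckets else pvDefaults

-- ===== PRECONDITION & SPEC =====
def Spec_recommendations_from_text_py (blob : String) (out : List (String × List String)) : Prop := out = recommendations_from_text_py_alt blob
instance (blob : String) (out : List (String × List String)) : Decidable (Spec_recommendations_from_text_py blob out) := by unfold Spec_recommendations_from_text_py; infer_instance

-- ===== CLAIM (what is proved, stated in full; the proofs are below) =====
def Claim_equal_recommendations_from_text_py : Prop := ∀ (blob : String), Dom_recommendations_from_text_py blob → Spec_recommendations_from_text_py blob (recommendations_from_text_py blob)

-- ===== LEMMAS AND PROOFS =====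
-- reference sequence of (bucket key, bullet text) pairs produced by A's loop, in order,
-- including empty bullet texts (which A's final _bullets pass removes)
def pvAsnA : List (List Char) → Option String → List (String × String)
  | [], _ => []
  | raw :: rest, current =>
    let line := PySem.Chars.strip raw
    if line = [] then pvAsnA rest current
    else
      let low := PySem.Chars.lower line
      match pvHeadings.find? (fun nk =>
          PySem.Chars.isIn nk.1 low && PySem.Chars.isIn [':'] (PySem.Chars.slice low none (some 40))) with
      | some nk => pvAsnA rest (some nk.2)
      | none =>
        if PySem.Chars.startswith line ['*'] || PySem.Chars.startswith line ['-'] ||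
            PySem.Chars.startswith line ['•'] then
          let cur := current.getD "lifestyle"
          (cur, String.ofList (PySem.Chars.strip
            (line.dropWhile (fun c => c = '*' || c = '•' || c = '-' || c = ' ')))) ::
            pvAsnA rest (some cur)
        else pvAsnA rest current

theorem pvLoopA_getD (lines : List (List Char)) (cur : Option String)
    (d : PySem.Dict String (List String)) (k : String) :
    (pvLoopA lines cur d).getD k [] =
      d.getD k [] ++ ((pvAsnA lines cur).filter (fun p => p.1 == k)).map (·.2) := by
  induction lines generalizing cur d with
  | nil => simp [pvLoopA, pvAsnA]
  | cons raw rest ih =>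
    rw [pvLoopA, pvAsnA]
    simp only
    split
    · exact ih cur d
    · split
      · exact ih _ d
      · split
        · rw [ih]
          rw [List.filter_cons]
          simp only
          by_cases hk : (cur.getD "lifestyle") = k
          · simp [hk]
          · have : ((cur.getD "lifestyle") == k) = false := by simpa using hk
            simp [this, PySem.Dict.getD_modify, Ne.symm hk]
        · exact ih cur d

theorem pvHeadings_vals : ∀ nk ∈ pvHeadings, nk.2 ∈ pvKeys := by decide

theorem pvLoopA_keys (lines : List (List Char)) (cur : Option String)
    (d : PySem.Dict String (List String))
    (hcur : ∀ c, cur = some c → d.contains c = true)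
    (hall : ∀ k ∈ pvKeys, d.contains k = true) :
    (pvLoopA lines cur d).keys = d.keys := by
  induction lines generalizing cur d with
  | nil => simp [pvLoopA]
  | cons raw rest ih =>
    rw [pvLoopA]
    simp only
    split
    · exact ih cur d hcur hall
    · split
      · rename_i nk hnk
        exact ih _ d (fun c hc => by
          cases hc
          exact hall _ (pvHeadings_vals nk (List.mem_of_find?_eq_some hnk)))
          hall
    -- remaining: bullet and other
      · split
        · have hcont : d.contains (cur.getD "lifestyle") = true := by
            cases cur with
            | none => exact hall _ (by simp [pvKeys])
            | some c => exact hcur c rfl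
          have hkeys : (d.modify (cur.getD "lifestyle") []
              (· ++ [String.ofList (PySem.Chars.strip
                ((PySem.Chars.strip raw).dropWhile (fun c => c = '*' || c = '•' || c = '-' || c = ' ')))])).keys = d.keys := by
            rw [PySem.Dict.keys_modify, PySem.Dict.keys_insert_of_contains _ _ hcont]
          rw [ih _ _ ?_ ?_, hkeys]
          · intro c hc; cases hc; simp [PySem.Dict.contains_modify]
          · intro k hk; simp [PySem.Dict.contains_modify, hall k hk]
        · exact ih cur d hcur hall

theorem find?_and_const {α} (p : α → Bool) (c : Bool) (l : List α) :
    l.find? (fun x => p x && c) = if c then l.find? p else none := by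
  cases c <;> simp

theorem startswith_single (c0 x : Char) (ls : List Char) :
    PySem.Chars.startswith (c0 :: ls) [x] = decide (c0 = x) := by
  simp only [PySem.Chars.startswith, List.isPrefixOf, Bool.and_true]
  rw [Bool.eq_iff_iff]
  simp only [beq_iff_eq, decide_eq_true_eq]
  exact eq_comm


theorem ofList_beq_empty (t : List Char) : (String.ofList t == "") = decide (t = []) := by
  by_cases ht : t = []
  · subst ht
    have h0 : (String.ofList [] : String) = "" := (String.empty_eq_iff.mpr rfl).symm
    rw [h0]
    decide
  · simp only [ht, decide_false]
    rw [beq_eq_false_iff_ne]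
    intro h
    exact ht (String.ofList_inj.mp (h.trans (String.empty_eq_iff.mpr rfl)))

theorem pvClassify_of_nil (raw : List Char) (h : PySem.Chars.strip raw = []) :
    pvClassify raw = none := by
  simp [pvClassify, h]

theorem pvClassify_of_heading (raw : List Char) (nk : List Char × String)
    (hf : pvHeadings.find? (fun x =>
        PySem.Chars.isIn x.1 (PySem.Chars.lower (PySem.Chars.strip raw)) &&
        PySem.Chars.isIn [':'] (PySem.Chars.slice (PySem.Chars.lower (PySem.Chars.strip raw)) none (some 40))) = some nk) :
    pvClassify raw = some (true, nk.2) := by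
  rw [find?_and_const] at hf
  cases hline : PySem.Chars.strip raw with
  | nil =>
    rw [hline] at hf
    have : (if PySem.Chars.isIn [':'] (PySem.Chars.slice (PySem.Chars.lower []) none (some 40)) = true then
        List.find? (fun x => PySem.Chars.isIn x.1 (PySem.Chars.lower [])) pvHeadings
      else none) = none := by decide
    rw [this] at hf; cases hf
  | cons c0 ls =>
    rw [hline] at hf
    simp only [pvClassify, hline, hf]

theorem pvClassify_of_nonheading (raw : List Char) (c0 : Char) (ls : List Char)
    (hline : PySem.Chars.strip raw = c0 :: ls)
    (hf : pvHeadings.find? (fun x =>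
        PySem.Chars.isIn x.1 (PySem.Chars.lower (PySem.Chars.strip raw)) &&
        PySem.Chars.isIn [':'] (PySem.Chars.slice (PySem.Chars.lower (PySem.Chars.strip raw)) none (some 40))) = none) :
    pvClassify raw =
      (if c0 = '*' || c0 = '-' || c0 = '•' then
        (if PySem.Chars.strip ((c0 :: ls).dropWhile (fun c => c = '*' || c = '•' || c = '-' || c = ' ')) = [] then none
         else some (false, String.ofList (PySem.Chars.strip ((c0 :: ls).dropWhile (fun c => c = '*' || c = '•' || c = '-' || c = ' ')))))
       else none) := by
  rw [find?_and_const] at hf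
  rw [hline] at hf
  simp only [pvClassify, hline, hf]

theorem pvAssignB_eq (lines : List (List Char)) (cur : Option String)
    (acc : List (String × String)) :
    pvAssignB (lines.filterMap pvClassify) (cur.getD "lifestyle") acc =
      acc ++ (pvAsnA lines cur).filter (fun p => !(p.2 == "")) := by
  induction lines generalizing cur acc with
  | nil => simp [pvAssignB, pvAsnA]
  | cons raw rest ih =>
    rw [pvAsnA]
    simp only
    split
    · rename_i h
      rw [List.filterMap_cons, pvClassify_of_nil raw h]
      simp only
      exact ih cur acc
    · rename_i h
      split
      · rename_i nk hf
        rw [List.filterMap_cons, pvClassify_of_heading raw nk hf]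
        simp only [pvAssignB]
        simpa using ih (some nk.2) acc
      · rename_i hf
        cases hline : PySem.Chars.strip raw with
        | nil => exact absurd hline h
        | cons c0 ls =>
          rw [List.filterMap_cons, pvClassify_of_nonheading raw c0 ls hline hf]
          rw [startswith_single, startswith_single, startswith_single]
          by_cases hb : (decide (c0 = '*') || decide (c0 = '-') || decide (c0 = '•')) = true
          · simp only [hb, if_true]
            by_cases ht : PySem.Chars.strip
                ((c0 :: ls).dropWhile (fun c => c = '*' || c = '•' || c = '-' || c = ' ')) = []
            · rw [if_pos ht, ht]
              simp only [List.filter_cons, ofList_beq_empty, decide_true, Bool.not_true]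
              simp only [Bool.false_eq_true, if_false]
              simpa using ih (some (cur.getD "lifestyle")) acc
            · rw [if_neg ht]
              simp only [pvAssignB, List.filter_cons, ofList_beq_empty, ht, decide_false,
                Bool.not_false, if_true]
              have := ih (some (cur.getD "lifestyle"))
                (acc ++ [(cur.getD "lifestyle", String.ofList (PySem.Chars.strip
                  ((c0 :: ls).dropWhile (fun c => c = '*' || c = '•' || c = '-' || c = ' '))))])
              simp only [Option.getD_some] at this
              rw [this, List.append_assoc]
              simp
          · have hb' : (decide (c0 = '*') || decide (c0 = '-') || decide (c0 = '•')) = false :=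
              by simpa using hb
            simp only [hb', Bool.false_eq_true, if_false]
            exact ih cur acc


theorem pvAsnA_stripped (lines : List (List Char)) (cur : Option String) :
    ∀ p ∈ pvAsnA lines cur, ∃ t, p.2 = String.ofList (PySem.Chars.strip t) := by
  induction lines generalizing cur with
  | nil => simp [pvAsnA]
  | cons raw rest ih =>
    rw [pvAsnA]
    simp only
    split
    · exact ih cur
    · split
      · exact ih _
      · split
        · intro p hp
          simp only [List.mem_cons] at hp
          rcases hp with hp | hp
          · exact ⟨_, by rw [hp]⟩
          · exact ih _ p hp
        · exact ih cur

theorem dw_prefix {p : Char → Bool} {t l : List Char} (hp : t <+: l) (hl : l.dropWhile p = l) :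
    t.dropWhile p = t := by
  cases t with
  | nil => rfl
  | cons a t' =>
    obtain ⟨r, rfl⟩ := hp
    rw [List.cons_append, List.dropWhile_cons] at hl
    rw [List.dropWhile_cons]
    by_cases ha : p a = true
    · simp [ha] at hl ⊢
      have := List.length_dropWhile_le p (t' ++ r)
      rw [hl] at this; simp at this
    · simp [ha]

theorem pvStrip_idem (t : List Char) :
    PySem.Chars.strip (PySem.Chars.strip t) = PySem.Chars.strip t := by
  unfold PySem.Chars.strip PySem.Chars.rstrip PySem.Chars.lstrip
  set p := PySem.Chars.isspace
  set u := t.dropWhile p with hu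
  have hu1 : u.dropWhile p = u := List.dropWhile_idempotent p t
  have hpre : ((u.reverse.dropWhile p).reverse) <+: u := by
    rw [← List.reverse_suffix]
    simpa using List.dropWhile_suffix (l := u.reverse) p
  have h1 : ((u.reverse.dropWhile p).reverse).dropWhile p = (u.reverse.dropWhile p).reverse :=
    dw_prefix hpre hu1
  rw [h1]
  simp [List.dropWhile_idempotent]

theorem pvBulletsA_eq (l : List (String × String)) (k : String)
    (h : ∀ p ∈ l, ∃ t, p.2 = String.ofList (PySem.Chars.strip t)) :
    pvBulletsA ((l.filter (fun p => p.1 == k)).map (·.2)) =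
      (((l.filter (fun p => !(p.2 == ""))).filter (fun p => p.1 == k)).map (·.2)) := by
  induction l with
  | nil => simp [pvBulletsA]
  | cons a l ih =>
    obtain ⟨t, ht⟩ := h a (by simp)
    have hih := ih (fun p hp => h p (List.mem_cons_of_mem _ hp))
    have hstrip : PySem.Chars.strip a.2.toList = PySem.Chars.strip t := by
      rw [ht, String.toList_ofList, pvStrip_idem]
    have hbe : (a.2 == "") = decide (PySem.Chars.strip t = []) := by
      rw [ht, ofList_beq_empty]
    by_cases ht0 : PySem.Chars.strip t = []
    · by_cases hk : (a.1 == k) = true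
      · simp only [List.filter_cons, hk, if_true, List.map_cons, hbe, ht0, decide_true,
          Bool.not_true, Bool.false_eq_true, if_false]
        unfold pvBulletsA
        rw [List.filterMap_cons]
        simp only [hstrip, ht0, if_pos]
        exact hih
      · simp only [List.filter_cons, hk, hbe, ht0, decide_true, Bool.not_true,
          Bool.false_eq_true, if_false]
        exact hih
    · by_cases hk : (a.1 == k) = true
      · simp only [List.filter_cons, hk, if_true, List.map_cons, hbe, ht0, decide_false,
          Bool.not_false]
        unfold pvBulletsA
        rw [List.filterMap_cons]
        simp only [hstrip, ht0, if_false]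
        unfold pvBulletsA at hih
        rw [ht]
        exact congrArg _ hih
      · simp only [List.filter_cons, hk, hbe, ht0, decide_false, Bool.not_false, if_true,
          Bool.false_eq_true, if_false]
        exact hih

theorem pvFoldl5_items (d : PySem.Dict String (List String)) (hk : d.keys = pvKeys) :
    (pvKeys.foldl (fun d k => d.insert k (pvBulletsA (d.getD k []))) d).items =
      pvKeys.map (fun k => (k, pvBulletsA (d.getD k []))) := by
  have hnd : d.keys.Nodup := by rw [hk]; decide
  have hkeys2 : (pvKeys.foldl (fun d k => d.insert k (pvBulletsA (d.getD k []))) d).keys = pvKeys := by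
    rw [PySem.Dict.keys_foldl_insert, hk]
    decide
  have hnd2 : (pvKeys.foldl (fun d k => d.insert k (pvBulletsA (d.getD k []))) d).keys.Nodup := by
    rw [hkeys2]; decide
  rw [PySem.Dict.items_eq_map_keys _ hnd2 [], hkeys2]
  apply List.map_congr_left
  intro k hkmem
  simp only [pvKeys] at hkmem
  simp only [pvKeys, List.foldl]
  fin_cases hkmem <;>
    simp [PySem.Dict.getD_insert]

theorem pvMain_eq (blob : String) :
    recommendations_from_text_py blob = recommendations_from_text_py_alt blob := by
  unfold recommendations_from_text_py recommendations_from_text_py_alt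
  split
  · rfl
  · rename_i hne
    simp only
    set lines := PySem.Chars.splitOn (PySem.Chars.replace blob.toList ['\r', '\n'] ['\n']) ['\n'] with hlines
    set d0 : PySem.Dict String (List String) :=
      PySem.Dict.ofList [("lifestyle", []), ("nutritional", []), ("emotional", []),
                         ("bioresonance", []), ("follow_up", [])] with hd0
    set asn := pvAsnA lines none with hasn
    have hd0keys : d0.keys = pvKeys := by rw [hd0]; decide
    have hkeys1 : (pvLoopA lines none d0).keys = pvKeys := by
      rw [pvLoopA_keys lines none d0 (by intro c hc; cases hc)
        (by intro k hkk; rw [PySem.Dict.contains_iff_mem_keys, hd0keys]; exact hkk), hd0keys]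
    have hgetD1 : ∀ k, (pvLoopA lines none d0).getD k [] =
        d0.getD k [] ++ ((asn.filter (fun p => p.1 == k)).map (·.2)) := by
      intro k; exact pvLoopA_getD lines none d0 k
    have hd0getD : ∀ k ∈ pvKeys, d0.getD k [] = [] := by
      intro k hkk
      fin_cases hkk <;> rfl
    have hitems : ((pvLoopA lines none d0).keys.foldl
        (fun d k => d.insert k (pvBulletsA (d.getD k []))) (pvLoopA lines none d0)).items =
        pvKeys.map (fun k => (k, pvBulletsA ((asn.filter (fun p => p.1 == k)).map (·.2)))) := by
      rw [hkeys1, pvFoldl5_items _ hkeys1]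
      apply List.map_congr_left
      intro k hkmem
      rw [hgetD1 k, hd0getD k hkmem, List.nil_append]
    have hassign : pvAssignB (lines.filterMap pvClassify) "lifestyle" [] =
        asn.filter (fun p => !(p.2 == "")) := by
      simpa using pvAssignB_eq lines none []
    have hbull : ∀ k, pvBulletsA ((asn.filter (fun p => p.1 == k)).map (·.2)) =
        (((asn.filter (fun p => !(p.2 == ""))).filter (fun p => p.1 == k)).map (·.2)) := by
      intro k
      exact pvBulletsA_eq asn k (pvAsnA_stripped lines none)
    have hfinal : ((pvLoopA lines none d0).keys.foldl
        (fun d k => d.insert k (pvBulletsA (d.getD k []))) (pvLoopA lines none d0)).items =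
        pvKeys.map (fun k => (k, ((pvAssignB (lines.filterMap pvClassify) "lifestyle" []).filter
          (fun p => p.1 == k)).map (·.2))) := by
      rw [hitems, hassign]
      apply List.map_congr_left
      intro k _
      rw [hbull k]
    have hval : ∀ (D : PySem.Dict String (List String)), D.values = D.items.map (·.2) :=
      fun D => rfl
    simp only [hval, hfinal]

-- ===== VERDICT (by name: the statement is the Claim_ definition above) =====
theorem recommendations_from_text_py_spec : Claim_equal_recommendations_from_text_py := by
  intro blob _
  unfold Spec_recommendations_from_text_py
  exact pvMain_eq blob
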